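-- pv_equiv track=rewrite | github.com/Igor743646/CodeWars | Pick peaks (5kyu Python).py | pick_peaks
-- ===== SOURCE A (Python) =====
-- def pick_peaks(arr):
--     position = []
--     peaks = []
--
--     for i in range(1, len(arr)-1):
--         if arr[i] > arr[i+1] and arr[i-1] < arr[i]:
--             position.append(i)
--             peaks.append(arr[i])
--         elif arr[i] == arr[i+1]:
--             s = 1
--             while i+1+s < len(arr) and arr[i] == arr[i+1+s]:
--                 s+=1
--             if i+1+s == len(arr):
--                 break
--             if arr[i] > arr[i+1+s] and arr[i-1] < arr[i]:
--                 position.append(i)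
--                 peaks.append(arr[i])
--                 i+=s
--
--     return {"pos": position, "peaks": peaks}
-- ===== SOURCE B (Python) =====
-- def pick_peaks(arr):
--     pos = []
--     peaks = []
--     cand = None
--     for i in range(1, len(arr)):
--         if arr[i - 1] < arr[i]:
--             cand = i
--         elif arr[i] < arr[i - 1]:
--             if cand is not None:
--                 pos.append(cand)
--                 peaks.append(arr[cand])
--                 cand = None
--     return {"pos": pos, "peaks": peaks}
-- ===== Notes on version B (the rewrite author's own statement) =====
-- stated objective: alternative
-- what changed: Replaced the nested rescan (an inner while that re-walks each plateau at every one of its indices) by a single forward pass that keeps only the index of the last rise (the plateau start) and emits it on the first fall.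
import Mathlib
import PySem

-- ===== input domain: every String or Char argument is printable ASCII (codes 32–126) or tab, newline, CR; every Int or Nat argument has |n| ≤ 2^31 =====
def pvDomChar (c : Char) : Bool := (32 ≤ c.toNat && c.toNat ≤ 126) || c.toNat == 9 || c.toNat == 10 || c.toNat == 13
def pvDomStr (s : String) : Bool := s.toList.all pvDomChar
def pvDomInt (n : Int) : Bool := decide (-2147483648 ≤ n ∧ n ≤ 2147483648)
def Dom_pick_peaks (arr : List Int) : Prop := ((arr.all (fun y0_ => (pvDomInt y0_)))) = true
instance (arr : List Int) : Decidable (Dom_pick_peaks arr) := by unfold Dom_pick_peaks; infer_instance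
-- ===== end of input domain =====

-- B replaces A's inner plateau rescan (an inner while re-walked at every plateau index) by a
-- single pass that keeps the index of the last rise and emits it on the first fall; same dict.

-- shared indexing helper: Python's arr[k]; every access in both ports is at an in-range
-- nonnegative index (guarded by the loop bounds), where List.getD is exactly Python indexing
def gv (arr : List Int) (k : Nat) : Int := arr.getD k 0

-- ===== PORT A =====
-- inner `while i+1+s < len(arr) and arr[i] == arr[i+1+s]: s += 1`, returns final s.
-- `fuel` only makes the recursion structural; fuel = len(arr) always suffices
def aScan (arr : List Int) (fuel i s : Nat) : Nat :=
  match fuel with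
  | 0 => s
  | fuel + 1 =>
    if i + 1 + s < arr.length ∧ gv arr i = gv arr (i + 1 + s) then aScan arr fuel i (s + 1) else s

-- `for i in range(1, len(arr)-1)` with the break; `i += s` in the Python is a no-op
-- (reassigning a for-loop variable), so it is not ported
def aLoop (arr : List Int) (fuel : Nat) (pos peaks : List Int) (i : Nat) : List Int × List Int :=
  match fuel with
  | 0 => (pos, peaks)
  | fuel + 1 =>
    if i + 1 < arr.length then
      if gv arr i > gv arr (i + 1) ∧ gv arr (i - 1) < gv arr i then
        aLoop arr fuel (pos ++ [(i : Int)]) (peaks ++ [gv arr i]) (i + 1)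
      else if gv arr i = gv arr (i + 1) then
        if i + 1 + aScan arr arr.length i 1 = arr.length then (pos, peaks)  -- break
        else if gv arr i > gv arr (i + 1 + aScan arr arr.length i 1) ∧ gv arr (i - 1) < gv arr i then
          aLoop arr fuel (pos ++ [(i : Int)]) (peaks ++ [gv arr i]) (i + 1)
        else aLoop arr fuel pos peaks (i + 1)
      else aLoop arr fuel pos peaks (i + 1)
    else (pos, peaks)

def pick_peaks (arr : List Int) : List (String × List Int) :=
  [("pos", (aLoop arr arr.length [] [] 1).1), ("peaks", (aLoop arr arr.length [] [] 1).2)]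

-- ===== PORT B =====
def bLoop (arr : List Int) (fuel : Nat) (pos peaks : List Int) (cand : Option Nat) (i : Nat) :
    List Int × List Int :=
  match fuel with
  | 0 => (pos, peaks)
  | fuel + 1 =>
    if i < arr.length then
      if gv arr (i - 1) < gv arr i then bLoop arr fuel pos peaks (some i) (i + 1)
      else if gv arr i < gv arr (i - 1) then
        match cand with
        | some j => bLoop arr fuel (pos ++ [(j : Int)]) (peaks ++ [gv arr j]) none (i + 1)
        | none => bLoop arr fuel pos peaks none (i + 1)
      else bLoop arr fuel pos peaks cand (i + 1)
    else (pos, peaks)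

def pick_peaks_alt (arr : List Int) : List (String × List Int) :=
  [("pos", (bLoop arr arr.length [] [] none 1).1), ("peaks", (bLoop arr arr.length [] [] none 1).2)]

-- ===== PRECONDITION & SPEC =====
def Spec_pick_peaks (arr : List Int) (out : List (String × List Int)) : Prop := out = pick_peaks_alt arr
instance (arr : List Int) (out : List (String × List Int)) : Decidable (Spec_pick_peaks arr out) := by unfold Spec_pick_peaks; infer_instance

-- ===== CLAIM (what is proved, stated in full; the proofs are below) =====
def Claim_equal_pick_peaks : Prop := ∀ (arr : List Int), Dom_pick_peaks arr → Spec_pick_peaks arr (pick_peaks arr)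

-- ===== LEMMAS AND PROOFS =====

-- first index t ≥ i with arr[t] ≠ v (arr.length if none); characterizes A's plateau scan
def fdAux (arr : List Int) (v : Int) : Nat → Nat → Nat
  | 0, _ => arr.length
  | k + 1, i => if gv arr i = v then fdAux arr v k (i + 1) else i

def fd (arr : List Int) (v : Int) (i : Nat) : Nat := fdAux arr v (arr.length - i) i

theorem fd_out (arr : List Int) (v : Int) (i : Nat) (h : ¬ i < arr.length) :
    fd arr v i = arr.length := by
  unfold fd
  have hk : arr.length - i = 0 := by omega
  rw [hk]
  rfl

theorem fd_unfold (arr : List Int) (v : Int) (i : Nat) (h : i < arr.length) :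
    fd arr v i = if gv arr i = v then fd arr v (i + 1) else i := by
  unfold fd
  have hk : arr.length - i = (arr.length - (i + 1)) + 1 := by omega
  rw [hk]
  rfl

theorem fd_step (arr : List Int) (v : Int) (i : Nat) (h : i < arr.length)
    (he : gv arr i = v) : fd arr v i = fd arr v (i + 1) := by
  rw [fd_unfold arr v i h, if_pos he]

theorem fd_stop (arr : List Int) (v : Int) (i : Nat) (h : i < arr.length)
    (he : gv arr i ≠ v) : fd arr v i = i := by
  rw [fd_unfold arr v i h, if_neg he]

theorem fd_spec (arr : List Int) (v : Int) : ∀ (m i : Nat), arr.length - i ≤ m → i ≤ arr.length →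
    i ≤ fd arr v i ∧ fd arr v i ≤ arr.length ∧
    (∀ k, i ≤ k → k < fd arr v i → gv arr k = v) ∧
    (fd arr v i < arr.length → gv arr (fd arr v i) ≠ v) := by
  intro m
  induction m with
  | zero =>
    intro i hm hle
    have hi : ¬ i < arr.length := by omega
    rw [fd_out arr v i hi]
    exact ⟨hle, le_refl _, fun k hk1 hk2 => absurd hk2 (by omega), fun h => absurd h (by omega)⟩
  | succ m ih =>
    intro i hm hle
    by_cases hi : i < arr.length
    · by_cases he : gv arr i = v
      · rw [fd_step arr v i hi he]
        obtain ⟨a, b, c, d⟩ := ih (i + 1) (by omega) (by omega)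
        refine ⟨by omega, b, ?_, d⟩
        intro k hk1 hk2
        rcases Nat.eq_or_lt_of_le hk1 with h' | h'
        · rw [← h']; exact he
        · exact c k h' hk2
      · rw [fd_stop arr v i hi he]
        exact ⟨le_refl _, by omega, fun k hk1 hk2 => absurd hk2 (by omega), fun _ => he⟩
    · rw [fd_out arr v i hi]
      exact ⟨by omega, le_refl _, fun k hk1 hk2 => absurd hk2 (by omega), fun h => absurd h (by omega)⟩

theorem aScan_fd (arr : List Int) (i : Nat) : ∀ (fuel s : Nat),
    arr.length - (i + 1 + s) ≤ fuel → i + 1 + s ≤ arr.length →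
    i + 1 + aScan arr fuel i s = fd arr (gv arr i) (i + 1 + s) := by
  intro fuel
  induction fuel with
  | zero =>
    intro s hm hle
    have he : i + 1 + s = arr.length := by omega
    rw [show aScan arr 0 i s = s from rfl, fd_out arr _ _ (by omega)]
    omega
  | succ fuel ih =>
    intro s hm hle
    by_cases h1 : i + 1 + s < arr.length
    · by_cases h2 : gv arr i = gv arr (i + 1 + s)
      · rw [show aScan arr (fuel + 1) i s = aScan arr fuel i (s + 1) from by
            simp [aScan, h1, h2],
          fd_step arr _ _ h1 h2.symm,
          show i + 1 + s + 1 = i + 1 + (s + 1) from by omega]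
        exact ih (s + 1) (by omega) (by omega)
      · rw [show aScan arr (fuel + 1) i s = s from by simp [aScan, h2],
          fd_stop arr _ _ h1 (fun hc => h2 hc.symm)]
    · rw [show aScan arr (fuel + 1) i s = s from by simp [aScan]; omega,
        fd_out arr _ _ (by omega)]
      omega

-- step lemmas-- step lemmas for the two loops
theorem aStep_out (arr pos peaks : List Int) (fuel i : Nat) (h : ¬ i + 1 < arr.length) :
    aLoop arr fuel pos peaks i = (pos, peaks) := by
  cases fuel <;> simp [aLoop, h]

theorem bStep_out (arr pos peaks : List Int) (cand : Option Nat) (fuel i : Nat)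
    (h : ¬ i < arr.length) : bLoop arr fuel pos peaks cand i = (pos, peaks) := by
  cases fuel <;> simp [bLoop, h]

theorem bStep_rise (arr pos peaks : List Int) (cand : Option Nat) (fuel i : Nat)
    (h : i < arr.length) (hr : gv arr (i - 1) < gv arr i) :
    bLoop arr (fuel + 1) pos peaks cand i = bLoop arr fuel pos peaks (some i) (i + 1) := by
  show (if i < arr.length then _ else _) = _
  rw [if_pos h, if_pos hr]

theorem bStep_fall_some (arr pos peaks : List Int) (j fuel i : Nat)
    (h : i < arr.length) (hf : gv arr i < gv arr (i - 1)) :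
    bLoop arr (fuel + 1) pos peaks (some j) i =
      bLoop arr fuel (pos ++ [(j : Int)]) (peaks ++ [gv arr j]) none (i + 1) := by
  show (if i < arr.length then _ else _) = _
  rw [if_pos h, if_neg (by omega), if_pos hf]

theorem bStep_fall_none (arr pos peaks : List Int) (fuel i : Nat)
    (h : i < arr.length) (hf : gv arr i < gv arr (i - 1)) :
    bLoop arr (fuel + 1) pos peaks none i = bLoop arr fuel pos peaks none (i + 1) := by
  show (if i < arr.length then _ else _) = _
  rw [if_pos h, if_neg (by omega), if_pos hf]

theorem bStep_eq (arr pos peaks : List Int) (cand : Option Nat) (fuel i : Nat)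
    (h : i < arr.length) (he : gv arr (i - 1) = gv arr i) :
    bLoop arr (fuel + 1) pos peaks cand i = bLoop arr fuel pos peaks cand (i + 1) := by
  show (if i < arr.length then _ else _) = _
  rw [if_pos h, if_neg (by omega), if_neg (by omega)]

theorem aStep_peak (arr pos peaks : List Int) (fuel i : Nat) (h : i + 1 < arr.length)
    (hc : gv arr i > gv arr (i + 1) ∧ gv arr (i - 1) < gv arr i) :
    aLoop arr (fuel + 1) pos peaks i =
      aLoop arr fuel (pos ++ [(i : Int)]) (peaks ++ [gv arr i]) (i + 1) := by
  show (if i + 1 < arr.length then _ else _) = _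
  rw [if_pos h, if_pos hc]

theorem aStep_break (arr pos peaks : List Int) (fuel i : Nat) (h : i + 1 < arr.length)
    (h1 : ¬ (gv arr i > gv arr (i + 1) ∧ gv arr (i - 1) < gv arr i))
    (h2 : gv arr i = gv arr (i + 1)) (h3 : i + 1 + aScan arr arr.length i 1 = arr.length) :
    aLoop arr (fuel + 1) pos peaks i = (pos, peaks) := by
  show (if i + 1 < arr.length then _ else _) = _
  rw [if_pos h, if_neg h1, if_pos h2, if_pos h3]

theorem aStep_plateau_peak (arr pos peaks : List Int) (fuel i : Nat) (h : i + 1 < arr.length)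
    (h1 : ¬ (gv arr i > gv arr (i + 1) ∧ gv arr (i - 1) < gv arr i))
    (h2 : gv arr i = gv arr (i + 1)) (h3 : ¬ i + 1 + aScan arr arr.length i 1 = arr.length)
    (h4 : gv arr i > gv arr (i + 1 + aScan arr arr.length i 1) ∧ gv arr (i - 1) < gv arr i) :
    aLoop arr (fuel + 1) pos peaks i =
      aLoop arr fuel (pos ++ [(i : Int)]) (peaks ++ [gv arr i]) (i + 1) := by
  show (if i + 1 < arr.length then _ else _) = _
  rw [if_pos h, if_neg h1, if_pos h2, if_neg h3, if_pos h4]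

theorem aStep_plateau_skip (arr pos peaks : List Int) (fuel i : Nat) (h : i + 1 < arr.length)
    (h1 : ¬ (gv arr i > gv arr (i + 1) ∧ gv arr (i - 1) < gv arr i))
    (h2 : gv arr i = gv arr (i + 1)) (h3 : ¬ i + 1 + aScan arr arr.length i 1 = arr.length)
    (h4 : ¬ (gv arr i > gv arr (i + 1 + aScan arr arr.length i 1) ∧ gv arr (i - 1) < gv arr i)) :
    aLoop arr (fuel + 1) pos peaks i = aLoop arr fuel pos peaks (i + 1) := by
  show (if i + 1 < arr.length then _ else _) = _
  rw [if_pos h, if_neg h1, if_pos h2, if_neg h3, if_neg h4]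

theorem aStep_skip (arr pos peaks : List Int) (fuel i : Nat) (h : i + 1 < arr.length)
    (h1 : ¬ (gv arr i > gv arr (i + 1) ∧ gv arr (i - 1) < gv arr i))
    (h2 : ¬ gv arr i = gv arr (i + 1)) :
    aLoop arr (fuel + 1) pos peaks i = aLoop arr fuel pos peaks (i + 1) := by
  show (if i + 1 < arr.length then _ else _) = _
  rw [if_pos h, if_neg h1, if_neg h2]

-- B never appends while walking a region whose adjacent elements are all equal
theorem bLoop_const (arr : List Int) : ∀ (fuel i : Nat) (pos peaks : List Int) (cand : Option Nat),
    (∀ k, i ≤ k → k < arr.length → gv arr (k - 1) = gv arr k) →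
    bLoop arr fuel pos peaks cand i = (pos, peaks) := by
  intro fuel
  induction fuel with
  | zero => intro i pos peaks cand hconst; rfl
  | succ fuel ih =>
    intro i pos peaks cand hconst
    by_cases hi : i < arr.length
    · rw [bStep_eq arr pos peaks cand fuel i hi (hconst i (le_refl _) hi)]
      exact ih (i + 1) pos peaks cand (fun k hk1 hk2 => hconst k (by omega) hk2)
    · exact bStep_out arr pos peaks cand _ i hi

theorem main_inv (arr : List Int) : ∀ (m i : Nat) (cand : Option Nat)
    (posB peaksB posA peaksA : List Int),
    arr.length - i ≤ m →
    ((cand = none ∧ posA = posB ∧ peaksA = peaksB)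
     ∨ (∃ j : Nat, cand = some j ∧ j < i ∧
          (∀ k, j ≤ k → k < i → gv arr k = gv arr j) ∧
          posA = posB ∧ peaksA = peaksB ∧
          (fd arr (gv arr j) i = arr.length ∨ gv arr j < gv arr (fd arr (gv arr j) i)))
     ∨ (∃ j : Nat, cand = some j ∧ j < i ∧
          (∀ k, j ≤ k → k < i → gv arr k = gv arr j) ∧
          posA = posB ++ [(j : Int)] ∧ peaksA = peaksB ++ [gv arr j] ∧
          fd arr (gv arr j) i < arr.length ∧ gv arr (fd arr (gv arr j) i) < gv arr j)) →
    aLoop arr m posA peaksA i = bLoop arr m posB peaksB cand i := by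
  intro m
  induction m with
  | zero =>
    intro i cand posB peaksB posA peaksA hm hinv
    have hi : ¬ i < arr.length := by omega
    rw [aStep_out arr posA peaksA _ i (by omega), bStep_out arr posB peaksB cand _ i hi]
    rcases hinv with ⟨_, rfl, rfl⟩ | ⟨j, _, _, _, rfl, rfl, _⟩ | ⟨j, _, _, _, _, _, hlt, _⟩
    · rfl
    · rfl
    · rw [fd_out arr _ i hi] at hlt; omega
  | succ m ih =>
    intro i cand posB peaksB posA peaksA hm hinv
    by_cases hn : i < arr.length
    · by_cases hg : i + 1 < arr.length
      · -- main step: both loops advance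
        rcases hinv with ⟨rfl, h1, h2⟩ | ⟨j, rfl, hji, hconst, h1, h2, hfwd⟩ |
          ⟨j, rfl, hji, hconst, h1, h2, hlt, hfall⟩
        · -- state NONE
          rw [h1, h2]
          by_cases hC1 : gv arr i > gv arr (i + 1) ∧ gv arr (i - 1) < gv arr i
          · rw [aStep_peak _ _ _ _ _ hg hC1, bStep_rise _ _ _ _ _ _ hn hC1.2]
            have hfd1 : fd arr (gv arr i) (i + 1) = i + 1 :=
              fd_stop arr _ _ hg (by have := hC1.1; omega)
            refine ih (i + 1) (some i) posB peaksB _ _ (by omega)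
              (Or.inr (Or.inr ⟨i, rfl, by omega,
                (by intro k hk1 hk2; have hk : k = i := (by omega); subst hk; rfl), rfl, rfl, ?_, ?_⟩))
            · rw [hfd1]; exact hg
            · rw [hfd1]; exact hC1.1
          · by_cases hC2 : gv arr i = gv arr (i + 1)
            · have hsc : i + 1 + aScan arr arr.length i 1 = fd arr (gv arr i) (i + 1) := by
                rw [aScan_fd arr i arr.length 1 (by omega) (by omega),
                  ← fd_step arr _ (i + 1) hg hC2.symm]
              by_cases hBr : i + 1 + aScan arr arr.length i 1 = arr.length
              · rw [aStep_break _ _ _ _ _ hg hC1 hC2 hBr]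
                have hfdn : fd arr (gv arr i) (i + 1) = arr.length := by rw [← hsc]; exact hBr
                obtain ⟨_, _, hcst, _⟩ := fd_spec arr (gv arr i) arr.length (i + 1) (by omega) (by omega)
                rw [hfdn] at hcst
                have hconst' : ∀ k, i + 1 ≤ k → k < arr.length → gv arr (k - 1) = gv arr k := by
                  intro k hk1 hk2
                  rw [hcst k hk1 hk2]
                  by_cases hk1' : i + 1 ≤ k - 1
                  · rw [hcst (k - 1) hk1' (by omega)]
                  · have hk : k - 1 = i := by omega
                    rw [hk]
                rcases lt_trichotomy (gv arr (i - 1)) (gv arr i) with hr | he | hf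
                · rw [bStep_rise _ _ _ _ _ _ hn hr]
                  exact (bLoop_const arr m (i + 1) _ _ _ hconst').symm
                · rw [bStep_eq _ _ _ _ _ _ hn he]
                  exact (bLoop_const arr m (i + 1) _ _ _ hconst').symm
                · rw [bStep_fall_none _ _ _ _ _ hn hf]
                  exact (bLoop_const arr m (i + 1) _ _ _ hconst').symm
              · obtain ⟨_, hleB, _, hneB⟩ := fd_spec arr (gv arr i) arr.length (i + 1) (by omega) (by omega)
                have ht : fd arr (gv arr i) (i + 1) < arr.length := by omega
                by_cases hC2b : gv arr i > gv arr (i + 1 + aScan arr arr.length i 1) ∧ gv arr (i - 1) < gv arr i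
                · rw [aStep_plateau_peak _ _ _ _ _ hg hC1 hC2 hBr hC2b, bStep_rise _ _ _ _ _ _ hn hC2b.2]
                  refine ih (i + 1) (some i) posB peaksB _ _ (by omega)
                    (Or.inr (Or.inr ⟨i, rfl, by omega,
                      (by intro k hk1 hk2; have hk : k = i := (by omega); subst hk; rfl), rfl, rfl, ht, ?_⟩))
                  have := hC2b.1
                  rw [hsc] at this
                  omega
                · rcases lt_trichotomy (gv arr (i - 1)) (gv arr i) with hr | he | hf
                  · rw [aStep_plateau_skip _ _ _ _ _ hg hC1 hC2 hBr hC2b, bStep_rise _ _ _ _ _ _ hn hr]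
                    refine ih (i + 1) (some i) posB peaksB posB peaksB (by omega)
                      (Or.inr (Or.inl ⟨i, rfl, by omega,
                        (by intro k hk1 hk2; have hk : k = i := (by omega); subst hk; rfl), rfl, rfl, Or.inr ?_⟩))
                    have hne := hneB ht
                    have hx : ¬ gv arr i > gv arr (i + 1 + aScan arr arr.length i 1) := fun hX => hC2b ⟨hX, hr⟩
                    rw [hsc] at hx
                    omega
                  · rw [aStep_plateau_skip _ _ _ _ _ hg hC1 hC2 hBr hC2b, bStep_eq _ _ _ _ _ _ hn he]
                    exact ih (i + 1) none posB peaksB posB peaksB (by omega) (Or.inl ⟨rfl, rfl, rfl⟩)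
                  · rw [aStep_plateau_skip _ _ _ _ _ hg hC1 hC2 hBr hC2b, bStep_fall_none _ _ _ _ _ hn hf]
                    exact ih (i + 1) none posB peaksB posB peaksB (by omega) (Or.inl ⟨rfl, rfl, rfl⟩)
            · rw [aStep_skip _ _ _ _ _ hg hC1 hC2]
              rcases lt_trichotomy (gv arr (i - 1)) (gv arr i) with hr | he | hf
              · rw [bStep_rise _ _ _ _ _ _ hn hr]
                refine ih (i + 1) (some i) posB peaksB posB peaksB (by omega)
                  (Or.inr (Or.inl ⟨i, rfl, by omega,
                    (by intro k hk1 hk2; have hk : k = i := (by omega); subst hk; rfl), rfl, rfl, Or.inr ?_⟩))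
                rw [fd_stop arr _ _ hg (fun hX => hC2 hX.symm)]
                have hx : ¬ gv arr i > gv arr (i + 1) := fun hX => hC1 ⟨hX, hr⟩
                omega
              · rw [bStep_eq _ _ _ _ _ _ hn he]
                exact ih (i + 1) none posB peaksB posB peaksB (by omega) (Or.inl ⟨rfl, rfl, rfl⟩)
              · rw [bStep_fall_none _ _ _ _ _ hn hf]
                exact ih (i + 1) none posB peaksB posB peaksB (by omega) (Or.inl ⟨rfl, rfl, rfl⟩)
        · -- state RISE
          rw [h1, h2]
          have gji : gv arr (i - 1) = gv arr j := hconst (i - 1) (by omega) (by omega)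
          by_cases hgi : gv arr i = gv arr j
          · have he : gv arr (i - 1) = gv arr i := by rw [gji, hgi]
            have hfdstep : fd arr (gv arr j) i = fd arr (gv arr j) (i + 1) := fd_step arr _ i hn hgi
            have hconstX : ∀ k, j ≤ k → k < i + 1 → gv arr k = gv arr j := by
              intro k hk1 hk2
              by_cases hk : k < i
              · exact hconst k hk1 hk
              · have hk' : k = i := by omega
                rw [hk']; exact hgi
            have hC1' : ¬ (gv arr i > gv arr (i + 1) ∧ gv arr (i - 1) < gv arr i) := by
              intro hX; have := hX.2; omega
            by_cases hC2 : gv arr i = gv arr (i + 1)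
            · have hsc : i + 1 + aScan arr arr.length i 1 = fd arr (gv arr j) (i + 1) := by
                rw [aScan_fd arr i arr.length 1 (by omega) (by omega),
                  ← fd_step arr _ (i + 1) hg hC2.symm, hgi]
              by_cases hBr : i + 1 + aScan arr arr.length i 1 = arr.length
              · rw [aStep_break _ _ _ _ _ hg hC1' hC2 hBr, bStep_eq _ _ _ _ _ _ hn he]
                have hfdn : fd arr (gv arr j) (i + 1) = arr.length := by rw [← hsc]; exact hBr
                obtain ⟨_, _, hcst, _⟩ := fd_spec arr (gv arr j) arr.length (i + 1) (by omega) (by omega)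
                rw [hfdn] at hcst
                have hconst' : ∀ k, i + 1 ≤ k → k < arr.length → gv arr (k - 1) = gv arr k := by
                  intro k hk1 hk2
                  rw [hcst k hk1 hk2]
                  by_cases hk1' : i + 1 ≤ k - 1
                  · rw [hcst (k - 1) hk1' (by omega)]
                  · have hk : k - 1 = i := by omega
                    rw [hk]; exact hgi
                exact (bLoop_const arr m (i + 1) _ _ _ hconst').symm
              · have hC2b : ¬ (gv arr i > gv arr (i + 1 + aScan arr arr.length i 1) ∧ gv arr (i - 1) < gv arr i) := by
                  intro hX; have := hX.2; omega
                rw [aStep_plateau_skip _ _ _ _ _ hg hC1' hC2 hBr hC2b, bStep_eq _ _ _ _ _ _ hn he]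
                refine ih (i + 1) (some j) posB peaksB posB peaksB (by omega)
                  (Or.inr (Or.inl ⟨j, rfl, by omega, hconstX, rfl, rfl, ?_⟩))
                rw [← hfdstep]; exact hfwd
            · rw [aStep_skip _ _ _ _ _ hg hC1' hC2, bStep_eq _ _ _ _ _ _ hn he]
              refine ih (i + 1) (some j) posB peaksB posB peaksB (by omega)
                (Or.inr (Or.inl ⟨j, rfl, by omega, hconstX, rfl, rfl, ?_⟩))
              rw [← hfdstep]; exact hfwd
          · have hfd : fd arr (gv arr j) i = i := fd_stop arr _ i hn hgi
            have hgt : gv arr j < gv arr i := by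
              rcases hfwd with h | h
              · rw [hfd] at h; omega
              · rw [hfd] at h; exact h
            have hr : gv arr (i - 1) < gv arr i := by rw [gji]; exact hgt
            rw [bStep_rise _ _ _ _ _ _ hn hr]
            by_cases hC1 : gv arr i > gv arr (i + 1) ∧ gv arr (i - 1) < gv arr i
            · rw [aStep_peak _ _ _ _ _ hg hC1]
              have hfd1 : fd arr (gv arr i) (i + 1) = i + 1 :=
                fd_stop arr _ _ hg (by have := hC1.1; omega)
              refine ih (i + 1) (some i) posB peaksB _ _ (by omega)
                (Or.inr (Or.inr ⟨i, rfl, by omega,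
                  (by intro k hk1 hk2; have hk : k = i := (by omega); subst hk; rfl), rfl, rfl, ?_, ?_⟩))
              · rw [hfd1]; exact hg
              · rw [hfd1]; exact hC1.1
            · by_cases hC2 : gv arr i = gv arr (i + 1)
              · have hsc : i + 1 + aScan arr arr.length i 1 = fd arr (gv arr i) (i + 1) := by
                  rw [aScan_fd arr i arr.length 1 (by omega) (by omega),
                    ← fd_step arr _ (i + 1) hg hC2.symm]
                by_cases hBr : i + 1 + aScan arr arr.length i 1 = arr.length
                · rw [aStep_break _ _ _ _ _ hg hC1 hC2 hBr]
                  have hfdn : fd arr (gv arr i) (i + 1) = arr.length := by rw [← hsc]; exact hBr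
                  obtain ⟨_, _, hcst, _⟩ := fd_spec arr (gv arr i) arr.length (i + 1) (by omega) (by omega)
                  rw [hfdn] at hcst
                  have hconst' : ∀ k, i + 1 ≤ k → k < arr.length → gv arr (k - 1) = gv arr k := by
                    intro k hk1 hk2
                    rw [hcst k hk1 hk2]
                    by_cases hk1' : i + 1 ≤ k - 1
                    · rw [hcst (k - 1) hk1' (by omega)]
                    · have hk : k - 1 = i := by omega
                      rw [hk]
                  exact (bLoop_const arr m (i + 1) _ _ _ hconst').symm
                · obtain ⟨_, hleB, _, hneB⟩ := fd_spec arr (gv arr i) arr.length (i + 1) (by omega) (by omega)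
                  have ht : fd arr (gv arr i) (i + 1) < arr.length := by omega
                  by_cases hC2b : gv arr i > gv arr (i + 1 + aScan arr arr.length i 1) ∧ gv arr (i - 1) < gv arr i
                  · rw [aStep_plateau_peak _ _ _ _ _ hg hC1 hC2 hBr hC2b]
                    refine ih (i + 1) (some i) posB peaksB _ _ (by omega)
                      (Or.inr (Or.inr ⟨i, rfl, by omega,
                        (by intro k hk1 hk2; have hk : k = i := (by omega); subst hk; rfl), rfl, rfl, ht, ?_⟩))
                    have := hC2b.1
                    rw [hsc] at this
                    omega
                  · rw [aStep_plateau_skip _ _ _ _ _ hg hC1 hC2 hBr hC2b]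
                    refine ih (i + 1) (some i) posB peaksB posB peaksB (by omega)
                      (Or.inr (Or.inl ⟨i, rfl, by omega,
                        (by intro k hk1 hk2; have hk : k = i := (by omega); subst hk; rfl), rfl, rfl, Or.inr ?_⟩))
                    have hne := hneB ht
                    have hx : ¬ gv arr i > gv arr (i + 1 + aScan arr arr.length i 1) := fun hX => hC2b ⟨hX, hr⟩
                    rw [hsc] at hx
                    omega
              · rw [aStep_skip _ _ _ _ _ hg hC1 hC2]
                refine ih (i + 1) (some i) posB peaksB posB peaksB (by omega)
                  (Or.inr (Or.inl ⟨i, rfl, by omega,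
                    (by intro k hk1 hk2; have hk : k = i := (by omega); subst hk; rfl), rfl, rfl, Or.inr ?_⟩))
                rw [fd_stop arr _ _ hg (fun hX => hC2 hX.symm)]
                have hx : ¬ gv arr i > gv arr (i + 1) := fun hX => hC1 ⟨hX, hr⟩
                omega
        · -- state PENDING
          rw [h1, h2]
          have gji : gv arr (i - 1) = gv arr j := hconst (i - 1) (by omega) (by omega)
          by_cases hgi : gv arr i = gv arr j
          · have he : gv arr (i - 1) = gv arr i := by rw [gji, hgi]
            have hfdstep : fd arr (gv arr j) i = fd arr (gv arr j) (i + 1) := fd_step arr _ i hn hgi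
            have hconstX : ∀ k, j ≤ k → k < i + 1 → gv arr k = gv arr j := by
              intro k hk1 hk2
              by_cases hk : k < i
              · exact hconst k hk1 hk
              · have hk' : k = i := by omega
                rw [hk']; exact hgi
            have hC1' : ¬ (gv arr i > gv arr (i + 1) ∧ gv arr (i - 1) < gv arr i) := by
              intro hX; have := hX.2; omega
            by_cases hC2 : gv arr i = gv arr (i + 1)
            · have hsc : i + 1 + aScan arr arr.length i 1 = fd arr (gv arr j) (i + 1) := by
                rw [aScan_fd arr i arr.length 1 (by omega) (by omega),
                  ← fd_step arr _ (i + 1) hg hC2.symm, hgi]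
              have hBr : ¬ i + 1 + aScan arr arr.length i 1 = arr.length := by
                rw [hsc, ← hfdstep]; omega
              have hC2b : ¬ (gv arr i > gv arr (i + 1 + aScan arr arr.length i 1) ∧ gv arr (i - 1) < gv arr i) := by
                intro hX; have := hX.2; omega
              rw [aStep_plateau_skip _ _ _ _ _ hg hC1' hC2 hBr hC2b, bStep_eq _ _ _ _ _ _ hn he]
              refine ih (i + 1) (some j) posB peaksB _ _ (by omega)
                (Or.inr (Or.inr ⟨j, rfl, by omega, hconstX, rfl, rfl, ?_, ?_⟩))
              · rw [← hfdstep]; exact hlt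
              · rw [← hfdstep]; exact hfall
            · rw [aStep_skip _ _ _ _ _ hg hC1' hC2, bStep_eq _ _ _ _ _ _ hn he]
              refine ih (i + 1) (some j) posB peaksB _ _ (by omega)
                (Or.inr (Or.inr ⟨j, rfl, by omega, hconstX, rfl, rfl, ?_, ?_⟩))
              · rw [← hfdstep]; exact hlt
              · rw [← hfdstep]; exact hfall
          · have hfd : fd arr (gv arr j) i = i := fd_stop arr _ i hn hgi
            have hflt : gv arr i < gv arr j := by rw [hfd] at hfall; exact hfall
            have hf : gv arr i < gv arr (i - 1) := by rw [gji]; exact hflt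
            rw [bStep_fall_some arr posB peaksB j _ i hn hf]
            have hC1' : ¬ (gv arr i > gv arr (i + 1) ∧ gv arr (i - 1) < gv arr i) := by
              intro hX; have := hX.2; omega
            by_cases hC2 : gv arr i = gv arr (i + 1)
            · have hsc : i + 1 + aScan arr arr.length i 1 = fd arr (gv arr i) (i + 1) := by
                rw [aScan_fd arr i arr.length 1 (by omega) (by omega),
                  ← fd_step arr _ (i + 1) hg hC2.symm]
              by_cases hBr : i + 1 + aScan arr arr.length i 1 = arr.length
              · rw [aStep_break _ _ _ _ _ hg hC1' hC2 hBr]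
                have hfdn : fd arr (gv arr i) (i + 1) = arr.length := by rw [← hsc]; exact hBr
                obtain ⟨_, _, hcst, _⟩ := fd_spec arr (gv arr i) arr.length (i + 1) (by omega) (by omega)
                rw [hfdn] at hcst
                have hconst' : ∀ k, i + 1 ≤ k → k < arr.length → gv arr (k - 1) = gv arr k := by
                  intro k hk1 hk2
                  rw [hcst k hk1 hk2]
                  by_cases hk1' : i + 1 ≤ k - 1
                  · rw [hcst (k - 1) hk1' (by omega)]
                  · have hk : k - 1 = i := by omega
                    rw [hk]
                exact (bLoop_const arr m (i + 1) _ _ _ hconst').symm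
              · have hC2b : ¬ (gv arr i > gv arr (i + 1 + aScan arr arr.length i 1) ∧ gv arr (i - 1) < gv arr i) := by
                  intro hX; have := hX.2; omega
                rw [aStep_plateau_skip _ _ _ _ _ hg hC1' hC2 hBr hC2b]
                exact ih (i + 1) none _ _ _ _ (by omega) (Or.inl ⟨rfl, rfl, rfl⟩)
            · rw [aStep_skip _ _ _ _ _ hg hC1' hC2]
              exact ih (i + 1) none _ _ _ _ (by omega) (Or.inl ⟨rfl, rfl, rfl⟩)
      · -- boundary: A is done (i + 1 = arr.length), B takes one last step
        rw [aStep_out _ _ _ _ _ hg]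
        rcases hinv with ⟨rfl, h1, h2⟩ | ⟨j, rfl, hji, hconst, h1, h2, hfwd⟩ |
          ⟨j, rfl, hji, hconst, h1, h2, hlt, hfall⟩
        · rw [h1, h2]
          rcases lt_trichotomy (gv arr (i - 1)) (gv arr i) with hr | he | hf
          · rw [bStep_rise _ _ _ _ _ _ hn hr, bStep_out _ _ _ _ _ _ (by omega)]
          · rw [bStep_eq _ _ _ _ _ _ hn he, bStep_out _ _ _ _ _ _ (by omega)]
          · rw [bStep_fall_none _ _ _ _ _ hn hf, bStep_out _ _ _ _ _ _ (by omega)]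
        · rw [h1, h2]
          have gji : gv arr (i - 1) = gv arr j := hconst (i - 1) (by omega) (by omega)
          by_cases hgi : gv arr i = gv arr j
          · have he : gv arr (i - 1) = gv arr i := by rw [gji, hgi]
            rw [bStep_eq _ _ _ _ _ _ hn he, bStep_out _ _ _ _ _ _ (by omega)]
          · have hfd : fd arr (gv arr j) i = i := fd_stop arr _ i hn hgi
            have hgt : gv arr j < gv arr i := by
              rcases hfwd with h | h
              · rw [hfd] at h; omega
              · rw [hfd] at h; exact h
            have hr : gv arr (i - 1) < gv arr i := by rw [gji]; exact hgt
            rw [bStep_rise _ _ _ _ _ _ hn hr, bStep_out _ _ _ _ _ _ (by omega)]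
        · rw [h1, h2]
          obtain ⟨hgeP, _, _, _⟩ := fd_spec arr (gv arr j) arr.length i (by omega) (by omega)
          have hfd : fd arr (gv arr j) i = i := by omega
          rw [hfd] at hfall
          have hf : gv arr i < gv arr (i - 1) := by
            rw [hconst (i - 1) (by omega) (by omega)]; exact hfall
          rw [bStep_fall_some arr posB peaksB j _ i hn hf, bStep_out _ _ _ _ _ _ (by omega)]
    · -- i ≥ arr.length: both loops are done
      rw [aStep_out arr posA peaksA _ i (by omega), bStep_out arr posB peaksB cand _ i hn]
      rcases hinv with ⟨_, rfl, rfl⟩ | ⟨j, _, _, _, rfl, rfl, _⟩ | ⟨j, _, _, _, _, _, hlt, _⟩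
      · rfl
      · rfl
      · rw [fd_out arr _ i hn] at hlt; omega

-- ===== VERDICT (by name: the statement is the Claim_ definition above) =====
theorem pick_peaks_spec : Claim_equal_pick_peaks := by
  intro arr _
  unfold Spec_pick_peaks pick_peaks pick_peaks_alt
  rw [main_inv arr arr.length 1 none [] [] [] [] (by omega) (Or.inl ⟨rfl, rfl, rfl⟩)]
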